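-- pv_equiv track=rewrite | github.com/datstat-consulting/FreqDomainDiffForecast | DensityOneFormalProof/numerics.py | lambda_via_square_divisor
-- ===== SOURCE A (Python) =====
-- from typing import List, Tuple, Dict
--
-- def lambda_via_square_divisor(n: int, mu: List[int]) -> int:
--     """Compute λ(n) by Σ_{d^2|n} μ(n/d^2)."""
--     s = 0
--     d = 1
--     while d*d <= n:
--         if n % (d*d) == 0:
--             s += mu[n // (d*d)]
--         d += 1
--     return s
-- ===== SOURCE B (Python) =====
-- from typing import List
--
-- def _isqrt(q: int) -> int:
--     """Floor square root by binary search."""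
--     lo, hi = 0, q
--     while lo < hi:
--         mid = (lo + hi + 1) // 2
--         if mid * mid <= q:
--             lo = mid
--         else:
--             hi = mid - 1
--     return lo
--
-- def lambda_via_square_divisor(n: int, mu: List[int]) -> int:
--     """Compute lambda(n) = sum of mu(k) over divisors k of n whose cofactor n//k is a perfect square."""
--     s = 0
--     i = 1
--     while i * i <= n:
--         if n % i == 0:
--             j = n // i
--             r = _isqrt(j)
--             if r * r == j:
--                 s += mu[i]
--             if j != i:
--                 t = _isqrt(i)
--                 if t * t == i:
--                     s += mu[j]
--         i += 1
--     return s
-- ===== Notes on version B (the rewrite author's own statement) =====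
-- stated objective: alternative
-- what changed: Instead of scanning all d<=sqrt(n) and testing d*d | n, B enumerates the divisor pairs (i, n//i) of n and, via a hand-written binary-search integer square root, adds mu[k] for each divisor k whose cofactor n//k is a perfect square (the bijection d <-> k = n//d^2 makes the sums equal).
import Mathlib
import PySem

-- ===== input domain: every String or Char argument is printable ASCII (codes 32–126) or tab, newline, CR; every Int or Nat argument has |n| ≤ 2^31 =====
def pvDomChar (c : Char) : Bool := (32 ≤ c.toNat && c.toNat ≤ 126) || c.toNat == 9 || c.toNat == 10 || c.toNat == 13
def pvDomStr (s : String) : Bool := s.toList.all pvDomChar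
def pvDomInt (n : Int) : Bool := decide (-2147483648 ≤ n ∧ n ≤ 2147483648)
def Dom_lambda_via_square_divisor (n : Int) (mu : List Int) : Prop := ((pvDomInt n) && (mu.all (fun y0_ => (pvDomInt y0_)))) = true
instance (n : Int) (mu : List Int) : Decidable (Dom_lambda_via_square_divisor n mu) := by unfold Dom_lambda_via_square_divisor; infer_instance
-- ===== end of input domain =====

-- B replaces A's scan over all d ≤ √n testing d²∣n by an enumeration of the divisor
-- pairs (i, n//i) of n, adding mu[k] for each divisor k whose cofactor n//k is a
-- perfect square (tested with a hand-written binary-search integer square root);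
-- objective: alternative (same asymptotic cost, genuinely different decomposition).

-- needed by the ports' termination proofs (kept above them for decreasing_by)
theorem int_le_mul_self (d : Int) : d ≤ d * d := by
  by_cases h : d ≤ 0
  · nlinarith
  · nlinarith

-- ===== PORT A =====
-- while d*d <= n: if n % (d*d) == 0: s += mu[n // (d*d)]; d += 1
-- mu[...] is ported as pyGetD with default 0: Pre_ excludes the inputs where Python
-- would raise IndexError, and inside Pre_ every index hit is in range.
def lambdaA_go (n : Int) (mu : List Int) (d s : Int) : Int :=
  if d * d ≤ n then
    lambdaA_go n mu (d + 1)
      (if PySem.Int.mod n (d * d) = 0 then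
         s + PySem.List.pyGetD mu (PySem.Int.floordiv n (d * d)) 0
       else s)
  else s
termination_by (n + 1 - d).toNat
decreasing_by
  have h2 := int_le_mul_self d
  omega

def lambda_via_square_divisor (n : Int) (mu : List Int) : Int :=
  lambdaA_go n mu 1 0

-- ===== PORT B =====
-- binary-search floor square root (_isqrt in Source B)
def bIsqrtGo (q lo hi : Int) : Int :=
  if lo < hi then
    if PySem.Int.floordiv (lo + hi + 1) 2 * PySem.Int.floordiv (lo + hi + 1) 2 ≤ q then
      bIsqrtGo q (PySem.Int.floordiv (lo + hi + 1) 2) hi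
    else
      bIsqrtGo q lo (PySem.Int.floordiv (lo + hi + 1) 2 - 1)
  else lo
termination_by (hi - lo).toNat
decreasing_by
  all_goals
    have hm : PySem.Int.floordiv (lo + hi + 1) 2 = (lo + hi + 1) / 2 :=
      PySem.Int.floordiv_eq_ediv_of_pos (by omega)
    omega

def bIsqrt (q : Int) : Int := bIsqrtGo q 0 q

-- loop body of B at divisor candidate i (the two mu-contributions of the pair (i, n//i))
def lambdaB_body (n : Int) (mu : List Int) (i s : Int) : Int :=
  if PySem.Int.mod n i = 0 then
    let j := PySem.Int.floordiv n i
    let s1 := if bIsqrt j * bIsqrt j = j then s + PySem.List.pyGetD mu i 0 else s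
    if j ≠ i then
      if bIsqrt i * bIsqrt i = i then s1 + PySem.List.pyGetD mu j 0 else s1
    else s1
  else s

def lambdaB_go (n : Int) (mu : List Int) (i s : Int) : Int :=
  if i * i ≤ n then
    lambdaB_go n mu (i + 1) (lambdaB_body n mu i s)
  else s
termination_by (n + 1 - i).toNat
decreasing_by
  have h2 := int_le_mul_self i
  omega

def lambda_via_square_divisor_alt (n : Int) (mu : List Int) : Int :=
  lambdaB_go n mu 1 0

-- ===== PRECONDITION & SPEC =====
-- Pre_ excludes exactly the inputs where Python A raises IndexError: for n ≥ 1 the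
-- loop's first iteration (d = 1) reads mu[n], so A returns normally iff n < len(mu).
def Pre_lambda_via_square_divisor (n : Int) (mu : List Int) : Prop :=
  1 ≤ n → n < (mu.length : Int)
instance (n : Int) (mu : List Int) : Decidable (Pre_lambda_via_square_divisor n mu) := by
  unfold Pre_lambda_via_square_divisor; infer_instance

def pvWitness_lambda_via_square_divisor : Int × List Int := (6, [0, 1, -1, -1, 0, -1, 1])

def Spec_lambda_via_square_divisor (n : Int) (mu : List Int) (out : Int) : Prop := out = lambda_via_square_divisor_alt n mu
instance (n : Int) (mu : List Int) (out : Int) : Decidable (Spec_lambda_via_square_divisor n mu out) := by unfold Spec_lambda_via_square_divisor; infer_instance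

-- ===== CLAIM (what is proved, stated in full; the proofs are below) =====
def Claim_equal_lambda_via_square_divisor : Prop := ∀ (n : Int) (mu : List Int), Dom_lambda_via_square_divisor n mu → Pre_lambda_via_square_divisor n mu → Spec_lambda_via_square_divisor n mu (lambda_via_square_divisor n mu)

-- ===== LEMMAS AND PROOFS =====

-- A's contribution at candidate d, and B's at candidate i, as standalone terms
def aTerm (n : Int) (mu : List Int) (e : Int) : Int :=
  if PySem.Int.mod n (e * e) = 0 then
    PySem.List.pyGetD mu (PySem.Int.floordiv n (e * e)) 0
  else 0

def bTerm (n : Int) (mu : List Int) (e : Int) : Int := lambdaB_body n mu e 0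

theorem bIsqrtGo_spec (q lo hi : Int) (h0 : 0 ≤ lo) (h1 : lo ≤ hi)
    (h2 : lo * lo ≤ q) (h3 : q < (hi + 1) * (hi + 1)) :
    0 ≤ bIsqrtGo q lo hi ∧ bIsqrtGo q lo hi * bIsqrtGo q lo hi ≤ q ∧
      q < (bIsqrtGo q lo hi + 1) * (bIsqrtGo q lo hi + 1) := by
  revert h0 h1 h2 h3
  induction lo, hi using bIsqrtGo.induct (q := q) with
  | case1 lo hi hlt hle ih =>
    intro h0 h1 h2 h3
    have hm : PySem.Int.floordiv (lo + hi + 1) 2 = (lo + hi + 1) / 2 :=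
      PySem.Int.floordiv_eq_ediv_of_pos (by omega)
    rw [bIsqrtGo, if_pos hlt, if_pos hle]
    exact ih (by omega) (by omega) hle h3
  | case2 lo hi hlt hle ih =>
    intro h0 h1 h2 h3
    have hm : PySem.Int.floordiv (lo + hi + 1) 2 = (lo + hi + 1) / 2 :=
      PySem.Int.floordiv_eq_ediv_of_pos (by omega)
    rw [bIsqrtGo, if_pos hlt, if_neg hle]
    exact ih h0 (by omega) h2 (by rw [not_le] at hle; nlinarith)
  | case3 lo hi hlt =>
    intro h0 h1 h2 h3
    rw [bIsqrtGo, if_neg hlt]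
    have hlohi : lo = hi := le_antisymm h1 (by omega)
    subst hlohi
    exact ⟨h0, h2, h3⟩

theorem bIsqrt_spec (q : Int) (hq : 0 ≤ q) :
    0 ≤ bIsqrt q ∧ bIsqrt q * bIsqrt q ≤ q ∧ q < (bIsqrt q + 1) * (bIsqrt q + 1) := by
  have := bIsqrtGo_spec q 0 q (le_refl 0) hq (by simpa using hq) (by nlinarith)
  simpa [bIsqrt] using this

theorem bIsqrt_unique (q r : Int) (hr : 0 ≤ r) (h : r * r ≤ q) (h2 : q < (r + 1) * (r + 1)) :
    bIsqrt q = r := by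
  have hq : 0 ≤ q := le_trans (mul_nonneg hr hr) h
  obtain ⟨b0, b1, b2⟩ := bIsqrt_spec q hq
  nlinarith [b0, b1, b2, h, h2]

theorem bIsqrt_sq (d : Int) (hd : 0 ≤ d) : bIsqrt (d * d) = d := by
  apply bIsqrt_unique _ _ hd le_rfl
  nlinarith

theorem lambdaA_go_eq (n : Int) (mu : List Int) (K : Int) (hK0 : 0 ≤ K)
    (hK1 : K * K ≤ n) (hK2 : n < (K + 1) * (K + 1)) :
    ∀ (m : Nat) (d s : Int), (K + 1 - d).toNat ≤ m → 1 ≤ d →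
      lambdaA_go n mu d s = s + ∑ e ∈ Finset.Icc d K, aTerm n mu e := by
  intro m
  induction m with
  | zero =>
    intro d s hm hd
    have hdK : K < d := by omega
    have h2 : (K + 1) * (K + 1) ≤ d * d := mul_le_mul (by omega) (by omega) (by omega) (by omega)
    rw [lambdaA_go, if_neg (by linarith), Finset.Icc_eq_empty (by omega), Finset.sum_empty,
      add_zero]
  | succ m ih =>
    intro d s hm hd
    by_cases h : d * d ≤ n
    · have hdK : d ≤ K := by
        by_contra hc
        have h1 : (K + 1) * (K + 1) ≤ d * d := mul_le_mul (by omega) (by omega) (by omega) (by omega)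
        linarith
      rw [lambdaA_go, if_pos h, ih (d + 1) _ (by omega) (by omega)]
      have hicc : Finset.Icc d K = insert d (Finset.Icc (d + 1) K) := by
        ext x; simp only [Finset.mem_Icc, Finset.mem_insert]; omega
      rw [hicc, Finset.sum_insert (by simp only [Finset.mem_Icc]; omega)]
      simp only [aTerm]
      split_ifs with hdvd <;> ring
    · have hdK : K < d := by
        by_contra hc
        have h1 : d * d ≤ K * K := mul_le_mul (by omega) (by omega) (by omega) (by omega)
        exact h (by linarith)
      rw [lambdaA_go, if_neg h, Finset.Icc_eq_empty (by omega), Finset.sum_empty, add_zero]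

theorem lambdaB_body_add (n : Int) (mu : List Int) (i s : Int) :
    lambdaB_body n mu i s = s + lambdaB_body n mu i 0 := by
  simp only [lambdaB_body]
  split_ifs <;> ring

theorem lambdaB_go_eq (n : Int) (mu : List Int) (K : Int) (hK0 : 0 ≤ K)
    (hK1 : K * K ≤ n) (hK2 : n < (K + 1) * (K + 1)) :
    ∀ (m : Nat) (d s : Int), (K + 1 - d).toNat ≤ m → 1 ≤ d →
      lambdaB_go n mu d s = s + ∑ e ∈ Finset.Icc d K, bTerm n mu e := by
  intro m
  induction m with
  | zero =>
    intro d s hm hd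
    have hdK : K < d := by omega
    have h2 : (K + 1) * (K + 1) ≤ d * d := mul_le_mul (by omega) (by omega) (by omega) (by omega)
    rw [lambdaB_go, if_neg (by linarith), Finset.Icc_eq_empty (by omega), Finset.sum_empty,
      add_zero]
  | succ m ih =>
    intro d s hm hd
    by_cases h : d * d ≤ n
    · have hdK : d ≤ K := by
        by_contra hc
        have h1 : (K + 1) * (K + 1) ≤ d * d := mul_le_mul (by omega) (by omega) (by omega) (by omega)
        linarith
      rw [lambdaB_go, if_pos h, ih (d + 1) _ (by omega) (by omega), lambdaB_body_add]
      have hicc : Finset.Icc d K = insert d (Finset.Icc (d + 1) K) := by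
        ext x; simp only [Finset.mem_Icc, Finset.mem_insert]; omega
      rw [hicc, Finset.sum_insert (by simp only [Finset.mem_Icc]; omega)]
      simp only [bTerm]
      ring
    · have hdK : K < d := by
        by_contra hc
        have h1 : d * d ≤ K * K := mul_le_mul (by omega) (by omega) (by omega) (by omega)
        exact h (by linarith)
      rw [lambdaB_go, if_neg h, Finset.Icc_eq_empty (by omega), Finset.sum_empty, add_zero]


-- the two contributions of B's body, separated
def bT1 (n : Int) (mu : List Int) (e : Int) : Int :=
  if PySem.Int.mod n e = 0 ∧
      bIsqrt (PySem.Int.floordiv n e) * bIsqrt (PySem.Int.floordiv n e) = PySem.Int.floordiv n e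
  then PySem.List.pyGetD mu e 0 else 0

def bT2 (n : Int) (mu : List Int) (e : Int) : Int :=
  if PySem.Int.mod n e = 0 ∧ PySem.Int.floordiv n e ≠ e ∧ bIsqrt e * bIsqrt e = e
  then PySem.List.pyGetD mu (PySem.Int.floordiv n e) 0 else 0

-- A's contribution, separated by whether n ≤ d⁴ (the d matched by bT1) or d⁴ < n (by bT2)
def aT1 (n : Int) (mu : List Int) (e : Int) : Int :=
  if PySem.Int.mod n (e * e) = 0 ∧ n ≤ e * e * (e * e)
  then PySem.List.pyGetD mu (PySem.Int.floordiv n (e * e)) 0 else 0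

def aT2 (n : Int) (mu : List Int) (e : Int) : Int :=
  if PySem.Int.mod n (e * e) = 0 ∧ e * e * (e * e) < n
  then PySem.List.pyGetD mu (PySem.Int.floordiv n (e * e)) 0 else 0

theorem bTerm_split (n : Int) (mu : List Int) (e : Int) :
    bTerm n mu e = bT1 n mu e + bT2 n mu e := by
  simp only [bTerm, lambdaB_body, bT1, bT2]
  split_ifs <;> simp_all

theorem aTerm_split (n : Int) (mu : List Int) (e : Int) :
    aTerm n mu e = aT1 n mu e + aT2 n mu e := by
  simp only [aTerm, aT1, aT2]
  split_ifs <;> simp_all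
  omega

theorem le_K_iff (n K e : Int) (hK0 : 0 ≤ K) (hK1 : K * K ≤ n) (hK2 : n < (K + 1) * (K + 1))
    (he : 0 ≤ e) : e ≤ K ↔ e * e ≤ n := by
  constructor
  · intro h
    have := mul_le_mul h h he hK0
    linarith
  · intro h
    by_contra hc
    have := mul_le_mul (show K + 1 ≤ e by omega) (show K + 1 ≤ e by omega) (by omega) (by omega)
    linarith

-- basic facts about the cofactor j = n // e of a positive divisor e of positive n
theorem cofactor_facts (n e : Int) (hn : 1 ≤ n) (he : 1 ≤ e) (hdvd : e ∣ n) :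
    e * PySem.Int.floordiv n e = n ∧ 1 ≤ PySem.Int.floordiv n e ∧
      PySem.Int.floordiv n e ∣ n := by
  have hfd : PySem.Int.floordiv n e = n / e := PySem.Int.floordiv_eq_ediv_of_pos (by omega)
  have hmul : n / e * e = n := Int.ediv_mul_cancel hdvd
  have h1 : e * PySem.Int.floordiv n e = n := by rw [hfd]; linarith [hmul]
  refine ⟨h1, ?_, ⟨e, by linarith⟩⟩
  nlinarith [h1]

theorem sum1_eq (n : Int) (mu : List Int) (K : Int) (hn : 1 ≤ n) (hK0 : 0 ≤ K)
    (hK1 : K * K ≤ n) (hK2 : n < (K + 1) * (K + 1)) :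
    ∑ e ∈ Finset.Icc 1 K, bT1 n mu e = ∑ e ∈ Finset.Icc 1 K, aT1 n mu e := by
  rw [show (∑ e ∈ Finset.Icc 1 K, bT1 n mu e) =
      ∑ e ∈ (Finset.Icc 1 K).filter (fun e => PySem.Int.mod n e = 0 ∧
        bIsqrt (PySem.Int.floordiv n e) * bIsqrt (PySem.Int.floordiv n e) =
          PySem.Int.floordiv n e), PySem.List.pyGetD mu e 0 by
    rw [Finset.sum_filter]; exact Finset.sum_congr rfl (fun e _ => by simp only [bT1])]
  rw [show (∑ e ∈ Finset.Icc 1 K, aT1 n mu e) =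
      ∑ d ∈ (Finset.Icc 1 K).filter (fun d => PySem.Int.mod n (d * d) = 0 ∧
        n ≤ d * d * (d * d)), PySem.List.pyGetD mu (PySem.Int.floordiv n (d * d)) 0 by
    rw [Finset.sum_filter]; exact Finset.sum_congr rfl (fun e _ => by simp only [aT1])]
  apply Finset.sum_nbij' (i := fun e => bIsqrt (PySem.Int.floordiv n e))
    (j := fun d => PySem.Int.floordiv n (d * d))
  · -- hi : image lands in the target filter
    intro e hee
    simp only [Finset.mem_filter, Finset.mem_Icc] at hee ⊢
    obtain ⟨⟨he1, heK⟩, hmod, hsq⟩ := hee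
    have hdvd : e ∣ n := (PySem.Int.mod_eq_zero_iff_dvd n e).mp hmod
    obtain ⟨hej, hj1, hjdvd⟩ := cofactor_facts n e hn he1 hdvd
    set j := PySem.Int.floordiv n e with hjdef
    set r := bIsqrt j with hrdef
    have hr0 : 0 ≤ r := (bIsqrt_spec j (by omega)).1
    have hr1 : 1 ≤ r := by
      rcases lt_or_ge r 1 with h | h
      · have : r = 0 := by omega
        rw [this] at hsq; omega
      · exact h
    have hjn : j ≤ n := Int.le_of_dvd (by omega) hjdvd
    have hrK : r ≤ K := (le_K_iff n K r hK0 hK1 hK2 hr0).mpr (by omega)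
    have hee2 : e * e ≤ n := (le_K_iff n K e hK0 hK1 hK2 (by omega)).mp heK
    have hejle : e ≤ j := le_of_mul_le_mul_left (show e * e ≤ e * j by linarith [hej]) (by omega)
    refine ⟨⟨hr1, hrK⟩, ?_, ?_⟩
    · exact (PySem.Int.mod_eq_zero_iff_dvd n (r * r)).mpr (hsq ▸ hjdvd)
    · have : e * j ≤ j * j := by nlinarith
      rw [hsq]; linarith [hej]
  · -- hj : preimage lands in the source filter
    intro d hdd
    simp only [Finset.mem_filter, Finset.mem_Icc] at hdd ⊢
    obtain ⟨⟨hd1, hdK⟩, hmod, hn4⟩ := hdd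
    have hdvd : d * d ∣ n := (PySem.Int.mod_eq_zero_iff_dvd n (d * d)).mp hmod
    obtain ⟨hdc, hc1, hcdvd⟩ := cofactor_facts n (d * d) hn (by nlinarith) hdvd
    set c := PySem.Int.floordiv n (d * d) with hcdef
    have hcled : c ≤ d * d := le_of_mul_le_mul_left (by nlinarith) (by nlinarith)
    have hcK : c ≤ K := (le_K_iff n K c hK0 hK1 hK2 (by omega)).mpr (by nlinarith)
    have hfdc : PySem.Int.floordiv n c = d * d := by
      have h1 : c * PySem.Int.floordiv n c = n := (cofactor_facts n c hn hc1 hcdvd).1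
      nlinarith [h1]
    refine ⟨⟨hc1, hcK⟩, (PySem.Int.mod_eq_zero_iff_dvd n c).mpr hcdvd, ?_⟩
    rw [hfdc, bIsqrt_sq d (by omega)]
  · -- left inverse
    intro e hee
    simp only [Finset.mem_filter, Finset.mem_Icc] at hee
    obtain ⟨⟨he1, heK⟩, hmod, hsq⟩ := hee
    have hdvd : e ∣ n := (PySem.Int.mod_eq_zero_iff_dvd n e).mp hmod
    obtain ⟨hej, hj1, hjdvd⟩ := cofactor_facts n e hn he1 hdvd
    rw [hsq]
    have h1 : PySem.Int.floordiv n (PySem.Int.floordiv n e) = e := by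
      have := (cofactor_facts n (PySem.Int.floordiv n e) hn hj1 hjdvd).1
      nlinarith [this]
    exact h1
  · -- right inverse
    intro d hdd
    simp only [Finset.mem_filter, Finset.mem_Icc] at hdd
    obtain ⟨⟨hd1, hdK⟩, hmod, hn4⟩ := hdd
    have hdvd : d * d ∣ n := (PySem.Int.mod_eq_zero_iff_dvd n (d * d)).mp hmod
    obtain ⟨hdc, hc1, hcdvd⟩ := cofactor_facts n (d * d) hn (by nlinarith) hdvd
    have hfdc : PySem.Int.floordiv n (PySem.Int.floordiv n (d * d)) = d * d := by
      have h1 := (cofactor_facts n (PySem.Int.floordiv n (d * d)) hn hc1 hcdvd).1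
      nlinarith [h1]
    rw [hfdc, bIsqrt_sq d (by omega)]
  · -- values agree
    intro e hee
    simp only [Finset.mem_filter, Finset.mem_Icc] at hee
    obtain ⟨⟨he1, heK⟩, hmod, hsq⟩ := hee
    have hdvd : e ∣ n := (PySem.Int.mod_eq_zero_iff_dvd n e).mp hmod
    obtain ⟨hej, hj1, hjdvd⟩ := cofactor_facts n e hn he1 hdvd
    rw [hsq]
    have h1 : PySem.Int.floordiv n (PySem.Int.floordiv n e) = e := by
      have := (cofactor_facts n (PySem.Int.floordiv n e) hn hj1 hjdvd).1
      nlinarith [this]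
    rw [h1]

theorem sum2_eq (n : Int) (mu : List Int) (K : Int) (hn : 1 ≤ n) (hK0 : 0 ≤ K)
    (hK1 : K * K ≤ n) (hK2 : n < (K + 1) * (K + 1)) :
    ∑ e ∈ Finset.Icc 1 K, bT2 n mu e = ∑ e ∈ Finset.Icc 1 K, aT2 n mu e := by
  rw [show (∑ e ∈ Finset.Icc 1 K, bT2 n mu e) =
      ∑ e ∈ (Finset.Icc 1 K).filter (fun e => PySem.Int.mod n e = 0 ∧
        PySem.Int.floordiv n e ≠ e ∧ bIsqrt e * bIsqrt e = e),
        PySem.List.pyGetD mu (PySem.Int.floordiv n e) 0 by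
    rw [Finset.sum_filter]; exact Finset.sum_congr rfl (fun e _ => by simp only [bT2])]
  rw [show (∑ e ∈ Finset.Icc 1 K, aT2 n mu e) =
      ∑ d ∈ (Finset.Icc 1 K).filter (fun d => PySem.Int.mod n (d * d) = 0 ∧
        d * d * (d * d) < n), PySem.List.pyGetD mu (PySem.Int.floordiv n (d * d)) 0 by
    rw [Finset.sum_filter]; exact Finset.sum_congr rfl (fun e _ => by simp only [aT2])]
  apply Finset.sum_nbij' (i := fun e => bIsqrt e) (j := fun d => d * d)
  · intro e hee
    simp only [Finset.mem_filter, Finset.mem_Icc] at hee ⊢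
    obtain ⟨⟨he1, heK⟩, hmod, hjne, hsq⟩ := hee
    have hdvd : e ∣ n := (PySem.Int.mod_eq_zero_iff_dvd n e).mp hmod
    obtain ⟨hej, hj1, hjdvd⟩ := cofactor_facts n e hn he1 hdvd
    set t := bIsqrt e with htdef
    have ht0 : 0 ≤ t := (bIsqrt_spec e (by omega)).1
    have ht1 : 1 ≤ t := by
      rcases lt_or_ge t 1 with h | h
      · have : t = 0 := by omega
        rw [this] at hsq; omega
      · exact h
    have hen : e ≤ n := Int.le_of_dvd (by omega) hdvd
    have htK : t ≤ K := (le_K_iff n K t hK0 hK1 hK2 ht0).mpr (by omega)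
    have hee2 : e * e ≤ n := (le_K_iff n K e hK0 hK1 hK2 (by omega)).mp heK
    have hstrict : e * e < n := by
      rcases lt_or_eq_of_le hee2 with h | h
      · exact h
      · exfalso
        apply hjne
        have : PySem.Int.floordiv n e * e = e * e := by nlinarith [hej]
        have := mul_right_cancel₀ (b := e) (by omega) this
        exact this
    refine ⟨⟨ht1, htK⟩, (PySem.Int.mod_eq_zero_iff_dvd n (t * t)).mpr (hsq ▸ hdvd), ?_⟩
    rw [hsq]; exact hstrict
  · intro d hdd
    simp only [Finset.mem_filter, Finset.mem_Icc] at hdd ⊢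
    obtain ⟨⟨hd1, hdK⟩, hmod, hn4⟩ := hdd
    have hdvd : d * d ∣ n := (PySem.Int.mod_eq_zero_iff_dvd n (d * d)).mp hmod
    obtain ⟨hdc, hc1, hcdvd⟩ := cofactor_facts n (d * d) hn (by nlinarith) hdvd
    have hddK : d * d ≤ K := (le_K_iff n K (d * d) hK0 hK1 hK2 (by nlinarith)).mpr (by linarith)
    refine ⟨⟨by nlinarith, hddK⟩, (PySem.Int.mod_eq_zero_iff_dvd n (d * d)).mpr hdvd, ?_, ?_⟩
    · intro hc
      rw [hc] at hdc
      nlinarith [hdc]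
    · rw [bIsqrt_sq d (by omega)]
  · intro e hee
    simp only [Finset.mem_filter, Finset.mem_Icc] at hee
    exact hee.2.2.2
  · intro d hdd
    simp only [Finset.mem_filter, Finset.mem_Icc] at hdd
    exact bIsqrt_sq d (by omega)
  · intro e hee
    simp only [Finset.mem_filter, Finset.mem_Icc] at hee
    rw [hee.2.2.2]

theorem core_sum_eq (n : Int) (mu : List Int) (K : Int) (hn : 1 ≤ n) (hK0 : 0 ≤ K)
    (hK1 : K * K ≤ n) (hK2 : n < (K + 1) * (K + 1)) :
    ∑ e ∈ Finset.Icc 1 K, bTerm n mu e = ∑ e ∈ Finset.Icc 1 K, aTerm n mu e := by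
  calc ∑ e ∈ Finset.Icc 1 K, bTerm n mu e
      = ∑ e ∈ Finset.Icc 1 K, (bT1 n mu e + bT2 n mu e) :=
        Finset.sum_congr rfl (fun e _ => bTerm_split n mu e)
    _ = (∑ e ∈ Finset.Icc 1 K, bT1 n mu e) + ∑ e ∈ Finset.Icc 1 K, bT2 n mu e :=
        Finset.sum_add_distrib
    _ = (∑ e ∈ Finset.Icc 1 K, aT1 n mu e) + ∑ e ∈ Finset.Icc 1 K, aT2 n mu e := by
        rw [sum1_eq n mu K hn hK0 hK1 hK2, sum2_eq n mu K hn hK0 hK1 hK2]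
    _ = ∑ e ∈ Finset.Icc 1 K, (aT1 n mu e + aT2 n mu e) := Finset.sum_add_distrib.symm
    _ = ∑ e ∈ Finset.Icc 1 K, aTerm n mu e :=
        Finset.sum_congr rfl (fun e _ => (aTerm_split n mu e).symm)

-- ===== VERDICT (by name: the statement is the Claim_ definition above) =====
theorem lambda_via_square_divisor_spec : Claim_equal_lambda_via_square_divisor := by
  intro n mu _dom _pre
  unfold Spec_lambda_via_square_divisor lambda_via_square_divisor lambda_via_square_divisor_alt
  by_cases hn : 1 ≤ n
  · have hq : (0:Int) ≤ n := by omega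
    obtain ⟨hK0, hK1, hK2⟩ := bIsqrt_spec n hq
    rw [lambdaA_go_eq n mu (bIsqrt n) hK0 hK1 hK2 (bIsqrt n).toNat 1 0 (by omega) le_rfl,
        lambdaB_go_eq n mu (bIsqrt n) hK0 hK1 hK2 (bIsqrt n).toNat 1 0 (by omega) le_rfl,
        core_sum_eq n mu (bIsqrt n) hn hK0 hK1 hK2]
  · rw [lambdaA_go, lambdaB_go]
    simp only [one_mul]
    rw [if_neg (by omega), if_neg (by omega)]
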